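-- pv_equiv track=rewrite | github.com/ZexiDilling/Compound-Database | plate_formatting.py | daughter_plate_generator
-- ===== SOURCE A (Python) =====
-- def daughter_plate_generator(mp_data, sample_amount, dp_name, dp_layout, volume):
--     """
--     Writes source plate information to destination plate. for well's and compound id, and how much to transferee
--     :param mp_data: Data for the MotherPlate
--     :param sample_amount: Amount of samples
--     :param dp_name: Name for the DaughterPlates
--     :param dp_layout: The Layout of the DaughterPlates
--     :param volume: How much volume is needed
--     :return: A dict with source and destination information.
--     """
--     dp_dict = {}
--     name_counter = 1
--     counter = 0
--     for plate in mp_data: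
--         for source_well, source_sample in mp_data[plate]:
--             if counter == sample_amount:
--                 name_counter += 1
--                 counter = 0
--
--             barcode = f"{dp_name}{name_counter}"
--             destination_well = dp_layout["sample"][counter]
--
--             dp_dict.setdefault(barcode, []).append(
--                 [destination_well, volume, source_well, source_sample, plate])
--             counter += 1
--     return dp_dict
-- ===== SOURCE B (Python) =====
-- def daughter_plate_generator(mp_data, sample_amount, dp_name, dp_layout, volume):
--     flat = [(w, s, p) for p, rows in mp_data.items() for w, s in rows]
--     dp_dict = {}
--     k = 1
--     while flat:
--         chunk, flat = flat[:sample_amount], flat[sample_amount:]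
--         dp_dict[f"{dp_name}{k}"] = [
--             [dp_layout["sample"][j], volume, w, s, p]
--             for j, (w, s, p) in enumerate(chunk)]
--         k += 1
--     return dp_dict
-- ===== Notes on version B (the rewrite author's own statement) =====
-- stated objective: alternative
-- what changed: B first flattens all (well, sample, plate) entries into one list and then slices it into successive sample_amount-sized chunks, assigning each whole chunk to its barcode at once, instead of A's per-entry loop with a stateful counter that resets and a setdefault/append per row.
import Mathlib
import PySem

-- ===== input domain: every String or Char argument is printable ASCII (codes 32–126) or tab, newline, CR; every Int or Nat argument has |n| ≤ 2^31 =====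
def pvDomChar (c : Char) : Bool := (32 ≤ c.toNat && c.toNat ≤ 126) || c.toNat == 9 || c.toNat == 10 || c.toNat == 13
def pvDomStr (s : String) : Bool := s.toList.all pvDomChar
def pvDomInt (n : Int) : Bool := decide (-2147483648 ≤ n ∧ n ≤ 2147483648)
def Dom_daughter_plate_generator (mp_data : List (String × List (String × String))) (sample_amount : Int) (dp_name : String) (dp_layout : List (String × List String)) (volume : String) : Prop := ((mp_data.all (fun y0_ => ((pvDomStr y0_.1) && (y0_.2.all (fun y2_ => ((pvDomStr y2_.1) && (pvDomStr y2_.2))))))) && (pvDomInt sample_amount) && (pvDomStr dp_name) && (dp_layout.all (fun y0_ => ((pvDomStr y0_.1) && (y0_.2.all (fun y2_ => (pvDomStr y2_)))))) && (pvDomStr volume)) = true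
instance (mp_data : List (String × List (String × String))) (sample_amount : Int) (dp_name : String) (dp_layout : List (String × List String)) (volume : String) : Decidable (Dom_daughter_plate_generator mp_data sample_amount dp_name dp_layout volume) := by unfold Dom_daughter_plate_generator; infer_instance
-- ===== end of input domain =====

-- B flattens all (well, sample, plate) entries into one list and slices it into sample_amount-sized
-- chunks, assigning each whole chunk to its barcode at once, instead of A's per-entry stateful
-- counter with reset and setdefault/append ("alternative" decomposition, same asymptotic cost).

-- ===== PORT A =====
def daughter_plate_generator (mp_data : List (String × List (String × String))) (sample_amount : Int) (dp_name : String) (dp_layout : List (String × List String)) (volume : String) : List (String × List (List String)) :=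
  (mp_data.foldl
    (fun (st : PySem.Dict String (List (List String)) × Int × Int) plate_pr =>
      -- 'for source_well, source_sample in mp_data[plate]': first-match lookup of the key
      (((PySem.Dict.mk mp_data).get? plate_pr.1).getD []).foldl
        (fun st2 row =>
          let name_counter := if st2.2.2 == sample_amount then st2.2.1 + 1 else st2.2.1
          let counter := if st2.2.2 == sample_amount then (0 : Int) else st2.2.2
          let barcode := dp_name ++ PySem.Int.toStr name_counter
          -- dp_layout["sample"][counter]; Pre_ keeps the key present and the index in range
          let destination_well :=
            PySem.List.pyGetD (((PySem.Dict.mk dp_layout).get? "sample").getD []) counter ""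
          -- dp_dict.setdefault(barcode, []).append(entry) = d[barcode] = d.get(barcode, []) + [entry]
          (st2.1.modify barcode []
             (fun v => v ++ [[destination_well, volume, row.1, row.2, plate_pr.1]]),
           name_counter, counter + 1))
        st)
    (PySem.Dict.empty, 1, 0)).1.items

-- ===== PORT B =====
-- the list comprehension building one barcode's rows from a chunk
def dpgBarcodeRows (dp_layout : List (String × List String)) (volume : String) (chunk : List (String × String × String)) : List (List String) :=
  (PySem.List.enumerate chunk 0).map
    (fun je => [PySem.List.pyGetD (((PySem.Dict.mk dp_layout).get? "sample").getD []) je.1 "",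
                volume, je.2.1, je.2.2.1, je.2.2.2])

-- the 'while flat:' loop; fuel = |flat| + 1 suffices since each pass drops ≥ 1 element when
-- sample_amount ≥ 1 (for sample_amount < 1 the Python while-loop does not terminate; outside Pre_)
def dpgChunkLoop (sample_amount : Int) (dp_name : String) (dp_layout : List (String × List String)) (volume : String) : Nat → List (String × String × String) → Int → PySem.Dict String (List (List String)) → PySem.Dict String (List (List String))
  | 0, _, _, d => d
  | fuel + 1, flat, k, d =>
    if flat = [] then d
    else
      dpgChunkLoop sample_amount dp_name dp_layout volume fuel
        (PySem.List.slice flat (some sample_amount) none)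
        (k + 1)
        (d.insert (dp_name ++ PySem.Int.toStr k)
          (dpgBarcodeRows dp_layout volume (PySem.List.slice flat none (some sample_amount))))

def daughter_plate_generator_alt (mp_data : List (String × List (String × String))) (sample_amount : Int) (dp_name : String) (dp_layout : List (String × List String)) (volume : String) : List (String × List (List String)) :=
  let flat := mp_data.flatMap (fun pr => pr.2.map (fun ws => (ws.1, ws.2, pr.1)))
  (dpgChunkLoop sample_amount dp_name dp_layout volume (flat.length + 1) flat 1 PySem.Dict.empty).items

-- ===== PRECONDITION & SPEC =====
-- Pre_ excludes: (a) inputs where A raises (missing "sample" key / layout shorter than the wells it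
-- indexes, reached as soon as there is at least one entry); (b) sample_amount < 1 with at least one
-- entry, where A's reset-on-equality misfires (for 0 it numbers plates from 2 out of the leftover
-- counter, an artefact) and B's chunking does not terminate; (c) assoc lists with duplicate plate
-- keys, which correspond to no Python dict.
def Pre_daughter_plate_generator (mp_data : List (String × List (String × String))) (sample_amount : Int) (dp_name : String) (dp_layout : List (String × List String)) (volume : String) : Prop :=
  (mp_data.map Prod.fst).Nodup ∧
  ((mp_data.map (fun pr => pr.2.length)).sum = 0 ∨
   (1 ≤ sample_amount ∧
    (PySem.Dict.mk dp_layout).contains "sample" = true ∧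
    min sample_amount ((mp_data.map (fun pr => pr.2.length)).sum : Int)
      ≤ ((((PySem.Dict.mk dp_layout).get? "sample").getD []).length : Int)))
instance (mp_data : List (String × List (String × String))) (sample_amount : Int) (dp_name : String) (dp_layout : List (String × List String)) (volume : String) : Decidable (Pre_daughter_plate_generator mp_data sample_amount dp_name dp_layout volume) := by unfold Pre_daughter_plate_generator; infer_instance
def pvWitness_daughter_plate_generator : (List (String × List (String × String))) × Int × String × (List (String × List String)) × String :=
  ([("P", [("A1", "s1"), ("A2", "s2")])], 1, "DP", [("sample", ["B1"])], "7")

def Spec_daughter_plate_generator (mp_data : List (String × List (String × String))) (sample_amount : Int) (dp_name : String) (dp_layout : List (String × List String)) (volume : String) (out : List (String × List (List String))) : Prop := out = daughter_plate_generator_alt mp_data sample_amount dp_name dp_layout volume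
instance (mp_data : List (String × List (String × String))) (sample_amount : Int) (dp_name : String) (dp_layout : List (String × List String)) (volume : String) (out : List (String × List (List String))) : Decidable (Spec_daughter_plate_generator mp_data sample_amount dp_name dp_layout volume out) := by unfold Spec_daughter_plate_generator; infer_instance

-- ===== CLAIM (what is proved, stated in full; the proofs are below) =====
def Claim_equal_daughter_plate_generator : Prop := ∀ (mp_data : List (String × List (String × String))) (sample_amount : Int) (dp_name : String) (dp_layout : List (String × List String)) (volume : String), Dom_daughter_plate_generator mp_data sample_amount dp_name dp_layout volume → Pre_daughter_plate_generator mp_data sample_amount dp_name dp_layout volume → Spec_daughter_plate_generator mp_data sample_amount dp_name dp_layout volume (daughter_plate_generator mp_data sample_amount dp_name dp_layout volume)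

-- ===== LEMMAS AND PROOFS =====

-- decimal digits determine the number: a digit-string evaluator inverts Nat.toDigits,
-- so distinct (nonnegative) counters give distinct barcodes
theorem pv_foldl_toDigitsCore (f : Nat) : ∀ (n : Nat) (l : List Char) (acc : Nat), n < f →
    ∃ k : Nat, 1 ≤ k ∧
      (Nat.toDigitsCore 10 f n l).foldl (fun a c => 10 * a + (c.toNat - 48)) acc
        = l.foldl (fun a c => 10 * a + (c.toNat - 48)) (acc * 10 ^ k + n) := by
  induction f with
  | zero => intro n l acc h; omega
  | succ f ih =>
    intro n l acc h
    rw [Nat.toDigitsCore]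
    by_cases h0 : n / 10 = 0
    · rw [if_pos h0]
      refine ⟨1, le_refl _, ?_⟩
      have hd : ((n % 10).digitChar.toNat - 48) = n := by
        have hn : n < 10 := by omega
        interval_cases n <;> decide
      simp only [List.foldl_cons, hd]
      congr 1
      ring
    · rw [if_neg h0]
      obtain ⟨k, hk, he⟩ := ih (n / 10) ((n % 10).digitChar :: l) acc (by omega)
      refine ⟨k + 1, by omega, ?_⟩
      rw [he]
      simp only [List.foldl_cons]
      have hd : ((n % 10).digitChar.toNat - 48) = n % 10 := by
        have h10 : n % 10 < 10 := Nat.mod_lt _ (by norm_num)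
        set m := n % 10 with hm
        clear_value m
        interval_cases m <;> decide
      rw [hd]
      congr 1
      have h1 : 10 * (n / 10) + n % 10 = n := Nat.div_add_mod n 10
      ring_nf
      omega

theorem pv_toDigits_inj {a b : Nat} (h : Nat.toDigits 10 a = Nat.toDigits 10 b) : a = b := by
  obtain ⟨k, -, hk⟩ := pv_foldl_toDigitsCore (a + 1) a [] 0 (by omega)
  obtain ⟨k', -, hk'⟩ := pv_foldl_toDigitsCore (b + 1) b [] 0 (by omega)
  have : (Nat.toDigits 10 a).foldl (fun a c => 10 * a + (c.toNat - 48)) 0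
       = (Nat.toDigits 10 b).foldl (fun a c => 10 * a + (c.toNat - 48)) 0 := by rw [h]
  rw [Nat.toDigits, Nat.toDigits] at this
  rw [hk, hk'] at this
  simpa using this

theorem pv_toStr_inj {a b : Int} (ha : 0 ≤ a) (hb : 0 ≤ b)
    (h : PySem.Int.toStr a = PySem.Int.toStr b) : a = b := by
  have h2 : PySem.Int.toChars a = PySem.Int.toChars b := by
    have := congrArg String.toList h
    simpa [PySem.Int.toStr] using this
  rw [PySem.Int.toChars, PySem.Int.toChars, if_neg (by omega), if_neg (by omega)] at h2
  have := pv_toDigits_inj h2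
  omega

theorem pv_bname_inj (dp_name : String) {a b : Int} (ha : 0 ≤ a) (hb : 0 ≤ b)
    (h : dp_name ++ PySem.Int.toStr a = dp_name ++ PySem.Int.toStr b) : a = b := by
  apply pv_toStr_inj ha hb
  have h2 := congrArg String.toList h
  simp only [String.toList_append] at h2
  have h3 := List.append_cancel_left h2
  exact String.toList_inj.mp h3

-- A's inner loop body, on flattened (well, sample, plate) triples
def pvStepA (sample_amount : Int) (dp_name : String) (dp_layout : List (String × List String)) (volume : String)
    (st : PySem.Dict String (List (List String)) × Int × Int) (t : String × String × String) :
    PySem.Dict String (List (List String)) × Int × Int :=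
  let name_counter := if st.2.2 == sample_amount then st.2.1 + 1 else st.2.1
  let counter := if st.2.2 == sample_amount then (0 : Int) else st.2.2
  let barcode := dp_name ++ PySem.Int.toStr name_counter
  let destination_well :=
    PySem.List.pyGetD (((PySem.Dict.mk dp_layout).get? "sample").getD []) counter ""
  (st.1.modify barcode [] (fun v => v ++ [[destination_well, volume, t.1, t.2.1, t.2.2]]),
   name_counter, counter + 1)

def pvFlat (mp_data : List (String × List (String × String))) : List (String × String × String) :=
  mp_data.flatMap (fun pr => pr.2.map (fun ws => (ws.1, ws.2, pr.1)))

def pvRows (dp_layout : List (String × List String)) (volume : String)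
    (cs : List (String × String × String)) (j : Int) : List (List String) :=
  (PySem.List.enumerate cs j).map
    (fun je => [PySem.List.pyGetD (((PySem.Dict.mk dp_layout).get? "sample").getD []) je.1 "",
                volume, je.2.1, je.2.2.1, je.2.2.2])

theorem pv_modify_insert_self (d : PySem.Dict String (List (List String))) (b : String)
    (es : List (List String)) (f : List (List String) → List (List String)) :
    (d.insert b es).modify b [] f = d.insert b (f es) := by
  rw [PySem.Dict.modify, PySem.Dict.getD_insert_self, PySem.Dict.insert_insert_self]

theorem pv_modify_fresh (d : PySem.Dict String (List (List String))) (b : String)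
    (f : List (List String) → List (List String))
    (h : d.contains b = false) :
    d.modify b [] f = d.insert b (f []) := by
  rw [PySem.Dict.modify, PySem.Dict.getD_of_not_contains d _ h]

theorem pv_chunkInner (sample_amount : Int) (dp_name : String) (dp_layout : List (String × List String)) (volume : String)
    (hs : 1 ≤ sample_amount) :
    ∀ (cs : List (String × String × String)) (j : Nat)
      (d : PySem.Dict String (List (List String))) (es : List (List String)) (k : Int),
      j + cs.length ≤ sample_amount.toNat →
      cs.foldl (pvStepA sample_amount dp_name dp_layout volume)
          (d.insert (dp_name ++ PySem.Int.toStr k) es, k, (j : Int))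
        = (d.insert (dp_name ++ PySem.Int.toStr k) (es ++ pvRows dp_layout volume cs j), k,
           (j : Int) + cs.length) := by
  intro cs
  induction cs with
  | nil => intro j d es k hle; simp [pvRows, PySem.List.enumerate]
  | cons c cs ih =>
    intro j d es k hle
    rw [List.foldl_cons]
    have hlen : j + (cs.length + 1) ≤ sample_amount.toNat := by simpa using hle
    have hne : ((j : Int) == sample_amount) = false := by
      simp only [beq_eq_false_iff_ne, ne_eq]
      intro hqe; omega
    have hstep : pvStepA sample_amount dp_name dp_layout volume
        (d.insert (dp_name ++ PySem.Int.toStr k) es, k, (j : Int)) c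
        = (d.insert (dp_name ++ PySem.Int.toStr k)
            (es ++ [[PySem.List.pyGetD (((PySem.Dict.mk dp_layout).get? "sample").getD []) (j : Int) "",
                     volume, c.1, c.2.1, c.2.2]]), k, (j : Int) + 1) := by
      simp only [pvStepA, hne, if_false, Bool.false_eq_true]
      rw [pv_modify_insert_self]
    rw [hstep]
    have hj1 : ((j : Int) + 1) = ((j + 1 : Nat) : Int) := by push_cast; ring
    rw [hj1, ih (j + 1) d _ k (by omega)]
    have hrows : pvRows dp_layout volume (c :: cs) (j : Int)
        = [PySem.List.pyGetD (((PySem.Dict.mk dp_layout).get? "sample").getD []) (j : Int) "",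
           volume, c.1, c.2.1, c.2.2] :: pvRows dp_layout volume cs ((j : Int) + 1) := by
      simp [pvRows, PySem.List.enumerate_cons]
    rw [hrows]
    simp only [Prod.mk.injEq]
    refine ⟨?_, by trivial, ?_⟩
    · rw [← hj1]; simp [List.append_assoc]
    · push_cast [List.length_cons]; ring

theorem pv_chunkStart (sample_amount : Int) (dp_name : String) (dp_layout : List (String × List String)) (volume : String)
    (hs : 1 ≤ sample_amount)
    (cs : List (String × String × String)) (d : PySem.Dict String (List (List String))) (k : Int)
    (hne : cs ≠ []) (hlen : cs.length ≤ sample_amount.toNat)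
    (hfresh : d.contains (dp_name ++ PySem.Int.toStr k) = false) :
    cs.foldl (pvStepA sample_amount dp_name dp_layout volume) (d, k, 0)
      = (d.insert (dp_name ++ PySem.Int.toStr k) (pvRows dp_layout volume cs 0), k,
         (cs.length : Int)) := by
  obtain ⟨c, cs', rfl⟩ := List.exists_cons_of_ne_nil hne
  rw [List.foldl_cons]
  have h0 : ((0 : Int) == sample_amount) = false := by
    simp only [beq_eq_false_iff_ne, ne_eq]; omega
  have hstep : pvStepA sample_amount dp_name dp_layout volume (d, k, 0) c
      = (d.insert (dp_name ++ PySem.Int.toStr k)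
          [[PySem.List.pyGetD (((PySem.Dict.mk dp_layout).get? "sample").getD []) (0 : Int) "",
            volume, c.1, c.2.1, c.2.2]], k, (0 : Int) + 1) := by
    simp only [pvStepA, h0, if_false, Bool.false_eq_true]
    rw [pv_modify_fresh d _ _ hfresh]; simp
  rw [hstep]
  have h01 : ((0 : Int) + 1) = ((1 : Nat) : Int) := by norm_num
  rw [h01]
  have := pv_chunkInner sample_amount dp_name dp_layout volume hs cs' 1 d
    [[PySem.List.pyGetD (((PySem.Dict.mk dp_layout).get? "sample").getD []) (0 : Int) "",
      volume, c.1, c.2.1, c.2.2]] k (by simp at hlen; omega)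
  rw [this]
  have hrows : pvRows dp_layout volume (c :: cs') 0
      = [PySem.List.pyGetD (((PySem.Dict.mk dp_layout).get? "sample").getD []) (0 : Int) "",
         volume, c.1, c.2.1, c.2.2] :: pvRows dp_layout volume cs' 1 := by
    simp [pvRows, PySem.List.enumerate_cons]
  rw [hrows]
  simp only [Prod.mk.injEq]
  refine ⟨by simp, by trivial, by push_cast [List.length_cons]; ring⟩

theorem pv_chunkLoop_nil (sample_amount : Int) (dp_name : String) (dp_layout : List (String × List String)) (volume : String)
    (fuel : Nat) (k : Int) (d : PySem.Dict String (List (List String))) :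
    dpgChunkLoop sample_amount dp_name dp_layout volume fuel [] k d = d := by
  cases fuel <;> simp [dpgChunkLoop]

theorem pv_mainLoop (sample_amount : Int) (dp_name : String) (dp_layout : List (String × List String)) (volume : String)
    (hs : 1 ≤ sample_amount) :
    ∀ (fuel : Nat) (flat : List (String × String × String)) (k : Int)
      (d : PySem.Dict String (List (List String))),
      flat.length ≤ fuel → 1 ≤ k →
      (∀ m : Int, k ≤ m → d.contains (dp_name ++ PySem.Int.toStr m) = false) →
      (flat.foldl (pvStepA sample_amount dp_name dp_layout volume) (d, k, 0)).1
        = dpgChunkLoop sample_amount dp_name dp_layout volume fuel flat k d := by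
  intro fuel
  induction fuel with
  | zero =>
    intro flat k d hlen hk hfresh
    have : flat = [] := List.eq_nil_of_length_eq_zero (by omega)
    subst this
    simp [pv_chunkLoop_nil]
  | succ fuel ih =>
    intro flat k d hlen hk hfresh
    by_cases hnil : flat = []
    · subst hnil; simp [pv_chunkLoop_nil]
    · rw [dpgChunkLoop, if_neg hnil]
      have hs0 : (0 : Int) ≤ sample_amount := by omega
      rw [PySem.List.slice_from flat hs0, PySem.List.slice_to flat hs0]
      have hsplit : flat = flat.take sample_amount.toNat ++ flat.drop sample_amount.toNat :=
        (List.take_append_drop _ _).symm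
      have htne : flat.take sample_amount.toNat ≠ [] := by
        intro hx
        rcases flat with _ | ⟨x, xs⟩
        · exact hnil rfl
        · rw [List.take_eq_nil_iff] at hx
          rcases hx with hx | hx
          · omega
          · exact hnil (by simp at hx)
      have htlen : (flat.take sample_amount.toNat).length ≤ sample_amount.toNat := by
        simp [List.length_take]
      conv_lhs => rw [hsplit]
      rw [List.foldl_append]
      rw [pv_chunkStart sample_amount dp_name dp_layout volume hs _ d k htne htlen (hfresh k le_rfl)]
      set D' := d.insert (dp_name ++ PySem.Int.toStr k)
        (pvRows dp_layout volume (flat.take sample_amount.toNat) 0) with hD'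
      have hbrows : dpgBarcodeRows dp_layout volume (flat.take sample_amount.toNat)
          = pvRows dp_layout volume (flat.take sample_amount.toNat) 0 := rfl
      rw [hbrows]
      have hfresh' : ∀ m : Int, k + 1 ≤ m → D'.contains (dp_name ++ PySem.Int.toStr m) = false := by
        intro m hm
        rw [hD', PySem.Dict.contains_insert]
        have h1 : (dp_name ++ PySem.Int.toStr m == dp_name ++ PySem.Int.toStr k) = false := by
          simp only [beq_eq_false_iff_ne, ne_eq]
          intro hx
          have := pv_bname_inj dp_name (by omega) (by omega) hx
          omega
        rw [h1, hfresh m (by omega)]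
        rfl
      by_cases hrest : flat.drop sample_amount.toNat = []
      · rw [hrest]
        simp only [List.foldl_nil]
        rw [pv_chunkLoop_nil]
      · -- a full chunk was taken; the next element resets the counter
        have hlt : sample_amount.toNat < flat.length := by
          by_contra hx
          exact hrest (List.drop_eq_nil_of_le (by omega))
        have hclen : (flat.take sample_amount.toNat).length = sample_amount.toNat := by
          simp [List.length_take]; omega
        rw [hclen]
        obtain ⟨r, rs, hr⟩ := List.exists_cons_of_ne_nil hrest
        have hcast : ((sample_amount.toNat : Nat) : Int) = sample_amount := by omega
        rw [hcast]
        have hshift : ∀ x, pvStepA sample_amount dp_name dp_layout volume (D', k, sample_amount) x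
            = pvStepA sample_amount dp_name dp_layout volume (D', k + 1, 0) x := by
          intro x
          simp only [pvStepA]
          have ht : ((sample_amount : Int) == sample_amount) = true := by simp
          have hf : ((0 : Int) == sample_amount) = false := by
            simp only [beq_eq_false_iff_ne, ne_eq]; omega
          rw [ht, hf]
          simp
        rw [hr, List.foldl_cons, hshift r, ← List.foldl_cons, ← hr]
        rw [ih (flat.drop sample_amount.toNat) (k + 1) D' (by simp [List.length_drop]; omega)
          (by omega) hfresh']

theorem pv_flatten (mp_data : List (String × List (String × String))) (sample_amount : Int)
    (dp_name : String) (dp_layout : List (String × List String)) (volume : String)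
    (h : (mp_data.map Prod.fst).Nodup) :
    daughter_plate_generator mp_data sample_amount dp_name dp_layout volume
      = ((pvFlat mp_data).foldl (pvStepA sample_amount dp_name dp_layout volume)
          (PySem.Dict.empty, 1, 0)).1.items := by
  unfold daughter_plate_generator pvFlat
  rw [List.foldl_flatMap]
  have hcongr : ∀ (acc : PySem.Dict String (List (List String)) × Int × Int),
      ∀ pr ∈ mp_data,
      (( ((PySem.Dict.mk mp_data).get? pr.1).getD []).foldl
        (fun st2 (row : String × String) =>
          let name_counter := if st2.2.2 == sample_amount then st2.2.1 + 1 else st2.2.1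
          let counter := if st2.2.2 == sample_amount then (0 : Int) else st2.2.2
          let barcode := dp_name ++ PySem.Int.toStr name_counter
          let destination_well :=
            PySem.List.pyGetD (((PySem.Dict.mk dp_layout).get? "sample").getD []) counter ""
          (st2.1.modify barcode []
             (fun v => v ++ [[destination_well, volume, row.1, row.2, pr.1]]),
           name_counter, counter + 1)) acc)
      = (pr.2.map (fun ws => (ws.1, ws.2, pr.1))).foldl (pvStepA sample_amount dp_name dp_layout volume) acc := by
    intro acc pr hpr
    have hget : ((PySem.Dict.mk mp_data).get? pr.1) = some pr.2 := by
      apply PySem.Dict.get?_of_mem_items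
      · exact (Prod.mk.eta (p := pr)) ▸ hpr
      · exact h
    rw [hget, List.foldl_map]
    rfl
  rw [PySem.List.foldl_congr_mem _ _ _ _ hcongr]

theorem pv_flat_len (mp_data : List (String × List (String × String))) :
    (pvFlat mp_data).length = (mp_data.map (fun pr => pr.2.length)).sum := by
  simp [pvFlat, List.length_flatMap]

-- ===== VERDICT (by name: the statement is the Claim_ definition above) =====
theorem daughter_plate_generator_spec : Claim_equal_daughter_plate_generator := by
  intro mp_data sample_amount dp_name dp_layout volume _hdom hpre
  obtain ⟨hnodup, hcase⟩ := hpre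
  unfold Spec_daughter_plate_generator daughter_plate_generator_alt
  rw [pv_flatten mp_data sample_amount dp_name dp_layout volume hnodup]
  show _ = (dpgChunkLoop sample_amount dp_name dp_layout volume ((pvFlat mp_data).length + 1)
      (pvFlat mp_data) 1 PySem.Dict.empty).items
  rcases hcase with h0 | ⟨hs, -, -⟩
  · have hnil : pvFlat mp_data = [] := by
      have := pv_flat_len mp_data
      apply List.eq_nil_of_length_eq_zero
      omega
    rw [hnil, pv_chunkLoop_nil]
    simp
  · congr 1
    exact pv_mainLoop sample_amount dp_name dp_layout volume hs _ _ 1 _ (by omega) le_rfl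
      (by intro m hm; simp [PySem.Dict.contains_empty])
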